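-- pv_equiv track=rewrite | github.com/Institut-zdravotnych-analyz/OSN-Algoritmus-MS-2024 | DRG-akykolvek-vykon/Algoritmus_v2.py | pril92
-- ===== SOURCE A (Python) =====
-- def pril92(diag, dgs):
--     dgs = dgs.split(",")
--     for d in range(len(dgs)):
--         dgs[d] = dgs[d].strip()
--     for d in dgs:
--         if len(d) == 0:
--             continue
--         r = d.split("-")
--         if len(r) == 1:
--             for dia in diag:
--                 if dia[:len(d)] == d:
--                     return True
--         else:
--             last = r[1].strip()
--             base = r[0][:-len(last)]
--             first = r[0][-len(last):]
--             for dia in diag: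
--                 if dia >= base + first and dia <= base + last:
--                     return True
-- ===== SOURCE B (Python) =====
-- def pril92(diag, dgs):
--     s = sorted(diag)
--     n = len(s)
--
--     def first_geq(x):
--         # index of the first element of s that is >= x (hand-written bisect_left)
--         lo, hi = 0, n
--         while lo < hi:
--             mid = (lo + hi) // 2
--             if s[mid] < x:
--                 lo = mid + 1
--             else:
--                 hi = mid
--         return lo
--
--     for pat in dgs.split(","):
--         d = pat.strip()
--         if not d:
--             continue
--         r = d.split("-")
--         if len(r) == 1:
--             i = first_geq(d)
--             if i < n and s[i].startswith(d):
--                 return True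
--         else:
--             last = r[1].strip()
--             hi_s = r[0][:-len(last)] + last
--             i = first_geq(r[0])
--             if i < n and s[i] <= hi_s:
--                 return True
-- ===== Notes on version B (the rewrite author's own statement) =====
-- stated objective: alternative
-- what changed: B sorts the diagnosis list once and answers each pattern (prefix or lexicographic range) with a hand-written binary search for the first element >= the pattern's lower bound, instead of A's linear scan of all diagnoses for every pattern.
import Mathlib
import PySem

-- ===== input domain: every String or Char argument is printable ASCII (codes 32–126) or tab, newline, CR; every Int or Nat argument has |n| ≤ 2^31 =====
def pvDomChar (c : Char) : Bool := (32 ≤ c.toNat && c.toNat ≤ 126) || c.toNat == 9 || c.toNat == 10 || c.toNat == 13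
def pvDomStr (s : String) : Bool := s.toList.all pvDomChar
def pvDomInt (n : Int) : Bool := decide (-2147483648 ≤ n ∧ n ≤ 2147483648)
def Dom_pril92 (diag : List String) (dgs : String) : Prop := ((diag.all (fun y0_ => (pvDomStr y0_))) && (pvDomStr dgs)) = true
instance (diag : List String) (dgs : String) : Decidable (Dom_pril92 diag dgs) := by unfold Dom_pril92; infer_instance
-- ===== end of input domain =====

-- B replaces A's linear scan of `diag` for every pattern by one initial sort of `diag`
-- plus a hand-written binary search per pattern (objective: alternative algorithm).

-- ===== PORT A =====
-- inner loop `for dia in diag: if dia[:len(d)] == d: return True`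
def pril92Go1 (d : String) : List String → Bool
  | [] => false
  | dia :: t =>
    if PySem.Str.slice dia none (some (PySem.Str.len d)) == d then true else pril92Go1 d t

-- inner loop `for dia in diag: if dia >= lo and dia <= hi: return True`
def pril92Go2 (lo hi : String) : List String → Bool
  | [] => false
  | dia :: t => if lo ≤ dia ∧ dia ≤ hi then true else pril92Go2 lo hi t

-- outer loop over the (already stripped) comma-separated patterns;
-- r = d.split("-"), last = r[1].strip(), base = r[0][:-len(last)], first = r[0][-len(last):]
-- are inlined below (r has ≥ 1 element, and ≥ 2 in the else branch, so getD indices are in range)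
def pril92Outer (diag : List String) : List String → Option Bool
  | [] => none
  | d :: rest =>
    if PySem.Str.len d == 0 then pril92Outer diag rest
    else
      if ((PySem.Str.split? d "-").getD []).length == 1 then   -- sep "-" ≠ "", split? is `some`
        if pril92Go1 d diag then some true else pril92Outer diag rest
      else
        if pril92Go2
            (PySem.Str.slice (((PySem.Str.split? d "-").getD []).getD 0 "") none
                (some (-(PySem.Str.len (PySem.Str.strip (((PySem.Str.split? d "-").getD []).getD 1 ""))))) ++
              PySem.Str.slice (((PySem.Str.split? d "-").getD []).getD 0 "")
                (some (-(PySem.Str.len (PySem.Str.strip (((PySem.Str.split? d "-").getD []).getD 1 ""))))) none)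
            (PySem.Str.slice (((PySem.Str.split? d "-").getD []).getD 0 "") none
                (some (-(PySem.Str.len (PySem.Str.strip (((PySem.Str.split? d "-").getD []).getD 1 ""))))) ++
              PySem.Str.strip (((PySem.Str.split? d "-").getD []).getD 1 "")) diag
        then some true else pril92Outer diag rest

def pril92 (diag : List String) (dgs : String) : Option Bool :=
  pril92Outer diag (((PySem.Str.split? dgs ",").getD []).map PySem.Str.strip)

-- ===== PORT B =====
-- hand-written bisect_left of Source B: `while lo < hi: mid = (lo+hi)//2; …`
-- (s[mid] is always in range when called with hi ≤ len s; getD transcribes the access)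
def pril92AltBs (s : List String) (x : String) (lo hi : Nat) : Nat :=
  if lo < hi then
    let mid := (lo + hi) / 2
    if s.getD mid "" < x then pril92AltBs s x (mid + 1) hi else pril92AltBs s x lo mid
  else lo
termination_by hi - lo
decreasing_by all_goals omega

-- outer loop of Source B: strip each piece, skip empties, binary-search per pattern
def pril92AltOuter (s : List String) (n : Nat) : List String → Option Bool
  | [] => none
  | pat :: rest =>
    if PySem.Str.strip pat == "" then pril92AltOuter s n rest
    else
      if ((PySem.Str.split? (PySem.Str.strip pat) "-").getD []).length == 1 then   -- sep "-" ≠ ""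
        if pril92AltBs s (PySem.Str.strip pat) 0 n < n ∧
            PySem.Str.startswith (s.getD (pril92AltBs s (PySem.Str.strip pat) 0 n) "")
              (PySem.Str.strip pat) = true
        then some true else pril92AltOuter s n rest
      else
        if pril92AltBs s (((PySem.Str.split? (PySem.Str.strip pat) "-").getD []).getD 0 "") 0 n < n ∧
            s.getD (pril92AltBs s (((PySem.Str.split? (PySem.Str.strip pat) "-").getD []).getD 0 "") 0 n) "" ≤
              PySem.Str.slice (((PySem.Str.split? (PySem.Str.strip pat) "-").getD []).getD 0 "") none
                  (some (-(PySem.Str.len (PySem.Str.strip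
                    (((PySem.Str.split? (PySem.Str.strip pat) "-").getD []).getD 1 ""))))) ++
                PySem.Str.strip (((PySem.Str.split? (PySem.Str.strip pat) "-").getD []).getD 1 "")
        then some true else pril92AltOuter s n rest

def pril92_alt (diag : List String) (dgs : String) : Option Bool :=
  let s := PySem.List.sorted diag id
  pril92AltOuter s s.length ((PySem.Str.split? dgs ",").getD [])

-- ===== PRECONDITION & SPEC =====
def Spec_pril92 (diag : List String) (dgs : String) (out : Option Bool) : Prop := out = pril92_alt diag dgs
instance (diag : List String) (dgs : String) (out : Option Bool) : Decidable (Spec_pril92 diag dgs out) := by unfold Spec_pril92; infer_instance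

-- ===== CLAIM (what is proved, stated in full; the proofs are below) =====
def Claim_equal_pril92 : Prop := ∀ (diag : List String) (dgs : String), Dom_pril92 diag dgs → Spec_pril92 diag dgs (pril92 diag dgs)


-- ===== LEMMAS AND PROOFS =====

-- a strict lexicographic extension: l < l ++ t for nonempty t
theorem pvLexAppend (l t : List Char) (ht : t ≠ []) : List.Lex (· < ·) l (l ++ t) := by
  induction l with
  | nil => cases t with
    | nil => exact absurd rfl ht
    | cons c t => exact List.Lex.nil
  | cons a l ih => exact List.Lex.cons ih

-- a prefix is lexicographically ≤ the whole string
theorem pvPrefixLe (s t : String) (h : s.toList <+: t.toList) : s ≤ t := by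
  rw [String.le_iff_toList_le]
  obtain ⟨u, hu⟩ := h
  rcases eq_or_ne u [] with rfl | hne
  · simp at hu; exact le_of_eq (by rw [hu])
  · exact le_of_lt (by rw [← hu]; exact pvLexAppend _ _ hne)

theorem pvConsLeIff (a b : Char) (l m : List Char) :
    (@LE.le _ (@List.LE' Char _) (a::l) (b::m)) ↔ (a < b ∨ (a = b ∧ @LE.le _ (@List.LE' Char _) l m)) := by
  rw [le_iff_lt_or_eq]
  constructor
  · rintro (h | h)
    · cases h with
      | rel h => exact Or.inl h
      | cons h => exact Or.inr ⟨rfl, le_of_lt h⟩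
    · rw [List.cons.injEq] at h
      exact Or.inr ⟨h.1, le_of_eq h.2⟩
  · rintro (h | ⟨rfl, h⟩)
    · exact Or.inl (List.Lex.rel h)
    · rcases lt_or_eq_of_le h with h' | rfl
      · exact Or.inl (List.Lex.cons h')
      · exact Or.inr rfl

theorem pvNotConsLeNil (c : Char) (l : List Char) : ¬ (@LE.le _ (@List.LE' Char _) (c::l) []) := by
  rw [le_iff_lt_or_eq]
  rintro (h | h)
  · exact List.not_lex_nil h
  · simp at h

theorem pvSandwichL (d z y : List Char) (hy : d <+: y)
    (h1 : @LE.le _ (@List.LE' Char _) d z) (h2 : @LE.le _ (@List.LE' Char _) z y) : d <+: z := by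
  induction d generalizing z y with
  | nil => exact List.nil_prefix
  | cons c d ih =>
    obtain ⟨y', rfl, hy'⟩ := List.cons_prefix_iff.1 hy
    cases z with
    | nil => exact absurd h1 (pvNotConsLeNil c d)
    | cons b z' =>
      rcases (pvConsLeIff c b d z').1 h1 with hcb | ⟨rfl, hdz⟩
      · rcases (pvConsLeIff b c z' y').1 h2 with hbc | ⟨rfl, _⟩
        · exact absurd (lt_trans hcb hbc) (lt_irrefl _)
        · exact absurd hcb (lt_irrefl _)
      · rcases (pvConsLeIff c c z' y').1 h2 with hbc | ⟨_, hzy⟩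
        · exact absurd hbc (lt_irrefl _)
        · exact List.cons_prefix_cons.2 ⟨rfl, ih z' y' hy' hdz hzy⟩

-- anything between a prefixed string d and an extension of d shares the prefix d
theorem pvSandwich (d z y : String) (hy : d.toList <+: y.toList)
    (h1 : d ≤ z) (h2 : z ≤ y) : d.toList <+: z.toList :=
  pvSandwichL _ _ _ hy (String.le_iff_toList_le.1 h1) (String.le_iff_toList_le.1 h2)

-- s[:a] + s[a:] = s
theorem pvSliceSplit (cs : List Char) (a : Int) :
    PySem.List.slice cs none (some a) ++ PySem.List.slice cs (some a) none = cs := by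
  have h := PySem.List.clampIdx_le cs.length a
  simp [PySem.List.slice]
  generalize PySem.List.clampIdx cs.length a = c at h ⊢
  rw [List.take_of_length_le (l := cs.drop c) (by simp)]
  exact List.take_append_drop c cs

theorem pvMono (s : List String) (hs : List.Pairwise (· ≤ ·) s) (i j : Nat)
    (hij : i ≤ j) (hj : j < s.length) : s.getD i "" ≤ s.getD j "" := by
  rcases Nat.lt_or_ge i j with h | h
  · have := (List.pairwise_iff_getElem.1 hs) i j (lt_trans h hj) hj h
    rwa [List.getD_eq_getElem _ _ (lt_trans h hj), List.getD_eq_getElem _ _ hj]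
  · have : i = j := le_antisymm hij h
    rw [this]

-- binary-search invariant: everything left of the result is < x, everything from it on is ≥ x
theorem pril92AltBs_spec (s : List String) (x : String)
    (hs : List.Pairwise (· ≤ ·) s) (lo hi : Nat) :
    lo ≤ hi → hi ≤ s.length →
    (lo ≤ pril92AltBs s x lo hi ∧ pril92AltBs s x lo hi ≤ hi ∧
    (∀ j, lo ≤ j → j < pril92AltBs s x lo hi → s.getD j "" < x) ∧
    (∀ j, pril92AltBs s x lo hi ≤ j → j < hi → x ≤ s.getD j "")) := by
  fun_induction pril92AltBs s x lo hi with
  | case1 lo hi hlt mid hmid ih =>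
    intro hle hhi
    obtain ⟨h1, h2, h3, h4⟩ := ih (by omega) hhi
    refine ⟨by omega, h2, ?_, h4⟩
    intro j hj1 hj2
    rcases Nat.lt_or_ge j (mid+1) with h | h
    · calc s.getD j "" ≤ s.getD mid "" := pvMono s hs j mid (by omega) (by omega)
        _ < x := hmid
    · exact h3 j h hj2
  | case2 lo hi hlt mid hmid ih =>
    intro hle hhi
    obtain ⟨h1, h2, h3, h4⟩ := ih (by omega) (by omega)
    refine ⟨h1, by omega, h3, ?_⟩
    intro j hj1 hj2
    rcases Nat.lt_or_ge j mid with h | h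
    · exact h4 j hj1 h
    · calc x ≤ s.getD mid "" := not_lt.1 hmid
        _ ≤ s.getD j "" := pvMono s hs mid j h (lt_of_lt_of_le hj2 hhi)
  | case3 lo hi h =>
    intro hle hhi
    exact ⟨le_refl _, by omega, fun j h1 h2 => absurd h2 (by omega),
           fun j h1 h2 => absurd h2 (by omega)⟩

theorem pvGetDMem (s : List String) (i : Nat) (h : i < s.length) : s.getD i "" ∈ s := by
  rw [List.getD_eq_getElem _ _ h]; exact List.getElem_mem h

-- nonemptiness of [lo, hi] ∩ s via the first element ≥ lo
theorem pvRangeIff (s : List String) (hs : List.Pairwise (· ≤ ·) s) (lo hi : String) :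
    (∃ y ∈ s, lo ≤ y ∧ y ≤ hi) ↔
      (pril92AltBs s lo 0 s.length < s.length ∧ s.getD (pril92AltBs s lo 0 s.length) "" ≤ hi) := by
  obtain ⟨-, -, h3, h4⟩ := pril92AltBs_spec s lo hs 0 s.length (Nat.zero_le _) (le_refl _)
  set i := pril92AltBs s lo 0 s.length with hidef
  constructor
  · rintro ⟨y, hy, hlo, hhi⟩
    obtain ⟨j, hj, rfl⟩ := List.mem_iff_getElem.1 hy
    rw [← List.getD_eq_getElem s "" hj] at hlo hhi
    have hij : i ≤ j := by
      by_contra hc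
      exact absurd hlo (not_le.2 (h3 j (Nat.zero_le _) (not_le.1 hc)))
    exact ⟨lt_of_le_of_lt hij hj, le_trans (pvMono s hs i j hij hj) hhi⟩
  · rintro ⟨hin, hle⟩
    exact ⟨s.getD i "", pvGetDMem s i hin, h4 i (le_refl _) hin, hle⟩

-- existence of an element with prefix d via the first element ≥ d
theorem pvPrefixIff (s : List String) (hs : List.Pairwise (· ≤ ·) s) (d : String) :
    (∃ y ∈ s, d.toList <+: y.toList) ↔
      (pril92AltBs s d 0 s.length < s.length ∧
        d.toList <+: (s.getD (pril92AltBs s d 0 s.length) "").toList) := by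
  obtain ⟨-, -, h3, h4⟩ := pril92AltBs_spec s d hs 0 s.length (Nat.zero_le _) (le_refl _)
  set i := pril92AltBs s d 0 s.length with hidef
  constructor
  · rintro ⟨y, hy, hpre⟩
    obtain ⟨j, hj, rfl⟩ := List.mem_iff_getElem.1 hy
    rw [← List.getD_eq_getElem s "" hj] at hpre
    have hdy : d ≤ s.getD j "" := pvPrefixLe _ _ hpre
    have hij : i ≤ j := by
      by_contra hc
      exact absurd hdy (not_le.2 (h3 j (Nat.zero_le _) (not_le.1 hc)))
    have hin : i < s.length := lt_of_le_of_lt hij hj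
    exact ⟨hin, pvSandwich d (s.getD i "") (s.getD j "") hpre (h4 i (le_refl _) hin)
      (pvMono s hs i j hij hj)⟩
  · rintro ⟨hin, hpre⟩
    exact ⟨s.getD i "", pvGetDMem s i hin, hpre⟩

theorem pril92Go1_any (d : String) (l : List String) :
    pril92Go1 d l = l.any (fun dia => PySem.Str.slice dia none (some (PySem.Str.len d)) == d) := by
  induction l with
  | nil => rfl
  | cons dia t ih =>
    simp only [pril92Go1, List.any_cons]
    split_ifs with h
    · rw [h, Bool.true_or]
    · rw [Bool.not_eq_true] at h
      rw [h, Bool.false_or, ih]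

theorem pril92Go2_any (lo hi : String) (l : List String) :
    pril92Go2 lo hi l = l.any (fun dia => decide (lo ≤ dia ∧ dia ≤ hi)) := by
  induction l with
  | nil => rfl
  | cons dia t ih =>
    simp only [pril92Go2, List.any_cons]
    split_ifs with h
    · rw [decide_eq_true h, Bool.true_or]
    · rw [decide_eq_false h, Bool.false_or, ih]

-- A's per-element prefix test is the prefix relation
theorem pvPreTest (d dia : String) :
    (PySem.Str.slice dia none (some (PySem.Str.len d)) == d) = decide (d.toList <+: dia.toList) := by
  have hlen : (0:Int) ≤ PySem.Str.len d := by rw [PySem.Str.len_eq]; positivity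
  rcases Bool.decide_iff (d.toList <+: dia.toList) |>.symm with _
  apply Bool.eq_iff_iff.2
  rw [beq_iff_eq, decide_eq_true_iff, ← String.toList_inj, PySem.Str.toList_slice,
    PySem.Chars.slice_eq_listSlice, PySem.List.slice_to _ hlen, PySem.Str.len_eq]
  simp only [Int.toNat_natCast]
  rw [List.prefix_iff_eq_take]
  exact ⟨fun h => h.symm, fun h => h.symm⟩

-- B's per-element prefix test
theorem pvStartswith (y d : String) :
    (PySem.Str.startswith y d = true) ↔ d.toList <+: y.toList := by
  rw [PySem.Str.startswith_eq]; exact PySem.Chars.startswith_iff _ _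

-- emptiness tests agree
theorem pvEmptyTest (d : String) : (PySem.Str.len d == 0) = (d == "") := by
  apply Bool.eq_iff_iff.2
  rw [beq_iff_eq, beq_iff_eq, PySem.Str.len_eq, ← String.toList_inj]
  simp

-- A's range lower bound base+first is r0
theorem pvBaseFirst (r0 : String) (k : Int) :
    PySem.Str.slice r0 none (some k) ++ PySem.Str.slice r0 (some k) none = r0 := by
  rw [← String.toList_inj, String.toList_append, PySem.Str.toList_slice, PySem.Str.toList_slice,
    PySem.Chars.slice_eq_listSlice, PySem.Chars.slice_eq_listSlice]
  exact pvSliceSplit r0.toList k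

-- per-pattern equivalence, prefix patterns
theorem pvStep1 (diag : List String) (d : String) :
    pril92Go1 d diag =
      decide (pril92AltBs (PySem.List.sorted diag id) d 0 (PySem.List.sorted diag id).length <
          (PySem.List.sorted diag id).length ∧
        PySem.Str.startswith
          ((PySem.List.sorted diag id).getD
            (pril92AltBs (PySem.List.sorted diag id) d 0 (PySem.List.sorted diag id).length) "") d = true) := by
  have hs : List.Pairwise (· ≤ ·) (PySem.List.sorted diag id) := by
    simpa using PySem.List.sorted_pairwise diag id
  have hperm := PySem.List.sorted_perm diag id false
  apply Bool.eq_iff_iff.2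
  rw [pril92Go1_any, List.any_eq_true, decide_eq_true_iff]
  constructor
  · rintro ⟨dia, hmem, htest⟩
    rw [pvPreTest, decide_eq_true_iff] at htest
    have := (pvPrefixIff _ hs d).1 ⟨dia, hperm.mem_iff.2 hmem, htest⟩
    exact ⟨this.1, (pvStartswith _ _).2 this.2⟩
  · rintro ⟨hin, hsw⟩
    obtain ⟨y, hy, hpre⟩ := (pvPrefixIff _ hs d).2 ⟨hin, (pvStartswith _ _).1 hsw⟩
    exact ⟨y, hperm.mem_iff.1 hy, by rw [pvPreTest, decide_eq_true_iff]; exact hpre⟩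

-- per-pattern equivalence, range patterns
theorem pvStep2 (diag : List String) (lo hi : String) :
    pril92Go2 lo hi diag =
      decide (pril92AltBs (PySem.List.sorted diag id) lo 0 (PySem.List.sorted diag id).length <
          (PySem.List.sorted diag id).length ∧
        (PySem.List.sorted diag id).getD
          (pril92AltBs (PySem.List.sorted diag id) lo 0 (PySem.List.sorted diag id).length) "" ≤ hi) := by
  have hs : List.Pairwise (· ≤ ·) (PySem.List.sorted diag id) := by
    simpa using PySem.List.sorted_pairwise diag id
  have hperm := PySem.List.sorted_perm diag id false
  apply Bool.eq_iff_iff.2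
  rw [pril92Go2_any, List.any_eq_true, decide_eq_true_iff]
  rw [← pvRangeIff _ hs lo hi]
  constructor
  · rintro ⟨dia, hmem, htest⟩
    exact ⟨dia, hperm.mem_iff.2 hmem, decide_eq_true_iff.1 htest⟩
  · rintro ⟨y, hy, hc⟩
    exact ⟨y, hperm.mem_iff.1 hy, decide_eq_true_iff.2 hc⟩

theorem pril92Outer_eq (diag : List String) (parts : List String) :
    pril92Outer diag (parts.map PySem.Str.strip) =
      pril92AltOuter (PySem.List.sorted diag id) (PySem.List.sorted diag id).length parts := by
  induction parts with
  | nil => rfl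
  | cons pat rest ih =>
    rw [List.map_cons, pril92Outer, pril92AltOuter, pvEmptyTest]
    by_cases hempty : (PySem.Str.strip pat == "") = true
    · rw [if_pos hempty, if_pos hempty, ih]
    · rw [if_neg hempty, if_neg hempty]
      by_cases hone :
          ((((PySem.Str.split? (PySem.Str.strip pat) "-").getD []).length == 1) = true)
      · rw [if_pos hone, if_pos hone, pvStep1 diag (PySem.Str.strip pat)]
        by_cases hB : (pril92AltBs (PySem.List.sorted diag id) (PySem.Str.strip pat) 0
              (PySem.List.sorted diag id).length < (PySem.List.sorted diag id).length ∧
            PySem.Str.startswith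
              ((PySem.List.sorted diag id).getD
                (pril92AltBs (PySem.List.sorted diag id) (PySem.Str.strip pat) 0
                  (PySem.List.sorted diag id).length) "") (PySem.Str.strip pat) = true)
        · rw [if_pos (decide_eq_true hB), if_pos hB]
        · rw [if_neg (by rw [decide_eq_false hB]; exact Bool.false_ne_true), if_neg hB, ih]
      · rw [if_neg hone, if_neg hone,
          pvBaseFirst (((PySem.Str.split? (PySem.Str.strip pat) "-").getD []).getD 0 "")
            (-(PySem.Str.len (PySem.Str.strip
              (((PySem.Str.split? (PySem.Str.strip pat) "-").getD []).getD 1 "")))),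
          pvStep2 diag]
        by_cases hB : (pril92AltBs (PySem.List.sorted diag id)
              (((PySem.Str.split? (PySem.Str.strip pat) "-").getD []).getD 0 "") 0
              (PySem.List.sorted diag id).length < (PySem.List.sorted diag id).length ∧
            (PySem.List.sorted diag id).getD
              (pril92AltBs (PySem.List.sorted diag id)
                (((PySem.Str.split? (PySem.Str.strip pat) "-").getD []).getD 0 "") 0
                (PySem.List.sorted diag id).length) "" ≤
              PySem.Str.slice (((PySem.Str.split? (PySem.Str.strip pat) "-").getD []).getD 0 "") none
                  (some (-(PySem.Str.len (PySem.Str.strip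
                    (((PySem.Str.split? (PySem.Str.strip pat) "-").getD []).getD 1 ""))))) ++
                PySem.Str.strip (((PySem.Str.split? (PySem.Str.strip pat) "-").getD []).getD 1 ""))
        · rw [if_pos (decide_eq_true hB), if_pos hB]
        · rw [if_neg (by rw [decide_eq_false hB]; exact Bool.false_ne_true), if_neg hB, ih]

-- ===== VERDICT (by name: the statement is the Claim_ definition above) =====
theorem pril92_spec : Claim_equal_pril92 := by
  intro diag dgs _
  unfold Spec_pril92 pril92 pril92_alt
  exact pril92Outer_eq diag ((PySem.Str.split? dgs ",").getD [])
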